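-- pv_equiv track=rewrite | github.com/mango606/baekjoon-hub | 백준/Silver/18429. 근손실/근손실.py | solution
-- ===== SOURCE A (Python) =====
-- def solution(N, K, kits, current_weight=500, day=0):
--     if day == N:
--         return 1
--
--     count = 0
--     for i in range(N):
--         if kits[i] is not None:  # 사용하지 않은 운동 키트인 경우
--             new_weight = current_weight + kits[i] - K
--             if new_weight >= 500:  # 중량이 500 이상 유지되는 경우만 탐색
--                 saved_kit = kits[i]
--                 kits[i] = None  # 현재 운동 키트를 사용했음을 표시
--                 count += solution(N, K, kits, new_weight, day+1)
--                 kits[i] = saved_kit  # 다음 탐색을 위해 운동 키트를 복원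
--     return count
-- ===== SOURCE B (Python) =====
-- def solution(N, K, kits, current_weight=500, day=0):
--     # DP over bitmasks: the number of valid completions depends only on the
--     # set of kits already used, so memoize on that set instead of exploring
--     # every ordering separately.
--     memo = {}
--
--     def count(used, weight, d):
--         if d == N:
--             return 1
--         if used in memo:
--             return memo[used]
--         total = 0
--         for i in range(N):
--             bit = 1 << i
--             if not used & bit:
--                 new_weight = weight + kits[i] - K
--                 if new_weight >= 500:
--                     total += count(used | bit, new_weight, d + 1)
--         memo[used] = total
--         return total
--
--     return count(0, current_weight, day)
-- ===== Notes on version B (the rewrite author's own statement) =====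
-- stated objective: faster
-- what changed: Replaces A's factorial backtracking over kit orderings (mutating the list with None markers) by a memoized DP keyed on the bitmask of used kits, since the remaining count depends only on that set; Pre_ excludes only the inputs where both programs raise IndexError (day != N and N > len(kits)).
import Mathlib
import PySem

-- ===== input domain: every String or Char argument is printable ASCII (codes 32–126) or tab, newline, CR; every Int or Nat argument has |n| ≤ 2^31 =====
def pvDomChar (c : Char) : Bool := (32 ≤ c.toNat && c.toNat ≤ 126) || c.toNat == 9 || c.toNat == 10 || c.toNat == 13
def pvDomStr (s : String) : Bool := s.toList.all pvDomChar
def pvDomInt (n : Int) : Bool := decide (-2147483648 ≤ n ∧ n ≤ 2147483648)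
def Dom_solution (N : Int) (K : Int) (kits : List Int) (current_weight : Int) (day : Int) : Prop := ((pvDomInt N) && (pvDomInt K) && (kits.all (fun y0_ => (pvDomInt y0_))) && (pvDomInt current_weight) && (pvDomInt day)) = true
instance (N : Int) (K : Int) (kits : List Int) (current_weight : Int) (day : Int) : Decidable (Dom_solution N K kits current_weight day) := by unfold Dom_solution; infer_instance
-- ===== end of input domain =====

-- B replaces A's factorial backtracking over kit orderings by a memoized DP on
-- the bitmask of used kits (the remaining count depends only on that set).
-- A temporarily mutates `kits` (writes None, then restores); the net effect is
-- no mutation, and the equivalence proved here is about the return value.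

-- ===== PORT A =====
-- Python A marks used kits by writing None into the list; the port models the
-- list as List (Option Int) and starts from kits.map some.  `for i in range(N)`
-- is ported as an index counter i running over 0..N.toNat-1 (empty for N ≤ 0,
-- exactly as range(N)).  Python's kits[i] raises IndexError out of range (those
-- inputs are excluded by Pre_); the port reads kitsO.getD i none there.
def pvCountSomes (l : List (Option Int)) : Nat := l.countP (fun o => o.isSome)

-- termination helper for port A: marking a present kit as used decreases the
-- number of unused kits
theorem pvCountSomes_set_none (l : List (Option Int)) (i : Nat) (v : Int)
    (h : l.getD i none = some v) : pvCountSomes (l.set i none) < pvCountSomes l := by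
  induction l generalizing i with
  | nil => simp [List.getD] at h
  | cons a t ih =>
    cases i with
    | zero =>
      simp [List.getD] at h
      subst h
      simp only [List.set_cons_zero, pvCountSomes, List.countP_cons]
      simp
    | succ j =>
      have hlt := ih j (by simpa [List.getD, List.getElem?_cons_succ] using h)
      simp only [List.set_cons_succ, pvCountSomes, List.countP_cons] at hlt ⊢
      omega

mutual
def pvGo (N K : Int) (kitsO : List (Option Int)) (cw day : Int) : Int :=
  if day = N then 1
  else pvLoopA N K kitsO cw day 0 0
  termination_by (pvCountSomes kitsO, 1, 0)
  decreasing_by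
  · exact Prod.Lex.right _ (Prod.Lex.left _ _ Nat.zero_lt_one)

def pvLoopA (N K : Int) (kitsO : List (Option Int)) (cw day : Int) (i : Nat) (acc : Int) : Int :=
  if hi : i < N.toNat then
    match h : kitsO.getD i none with
    | none => pvLoopA N K kitsO cw day (i + 1) acc
    | some v =>
      if 500 ≤ cw + v - K then
        pvLoopA N K kitsO cw day (i + 1)
          (acc + pvGo N K (kitsO.set i none) (cw + v - K) (day + 1))
      else pvLoopA N K kitsO cw day (i + 1) acc
  else acc
  termination_by (pvCountSomes kitsO, 0, N.toNat - i)
  decreasing_by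
  · exact Prod.Lex.right _ (Prod.Lex.right _ (by omega))
  · exact Prod.Lex.left _ _ (pvCountSomes_set_none _ _ _ h)
  · exact Prod.Lex.right _ (Prod.Lex.right _ (by omega))
  · exact Prod.Lex.right _ (Prod.Lex.right _ (by omega))
end

def solution (N : Int) (K : Int) (kits : List Int) (current_weight : Int) (day : Int) : Int :=
  pvGo N K (kits.map some) current_weight day

-- ===== PORT B =====
-- transliteration of Source B: recursion on (used, weight, d) with a memo dict
-- keyed on the bitmask `used`; `not used & (1 << i)` is `used.testBit i = false`.
def pvUnused (n used : Nat) : Nat := (List.range n).countP (fun j => !used.testBit j)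

-- termination helpers for port B: setting an unset bit below n decreases the
-- number of unset bits below n
theorem pvCountP_lt (l : List Nat) (p p' : Nat → Bool) (i : Nat) (hmem : i ∈ l)
    (hp : p i = true) (hp' : p' i = false) (himp : ∀ j, p' j = true → p j = true) :
    l.countP p' < l.countP p := by
  induction l with
  | nil => simp at hmem
  | cons a t ih =>
    rcases List.mem_cons.mp hmem with rfl | hmem'
    · have hle : t.countP p' ≤ t.countP p := List.countP_mono_left (fun x _ hx => himp x hx)
      have e1 : (if p i = true then 1 else 0) = 1 := by simp [hp]
      have e2 : (if p' i = true then 1 else 0) = 0 := by simp [hp']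
      simp only [List.countP_cons, e1, e2]
      omega
    · have ht := ih hmem'
      have hca : (if p' a = true then 1 else 0) ≤ (if p a = true then 1 else 0) := by
        by_cases ha : p' a = true
        · simp [ha, himp a ha]
        · simp [ha]
      simp only [List.countP_cons]
      omega

theorem pvUnused_lt (n i used : Nat) (hi : i < n) (h : used.testBit i = false) :
    pvUnused n (used ||| 1 <<< i) < pvUnused n used := by
  apply pvCountP_lt _ _ _ i (List.mem_range.mpr hi)
  · simp [h]
  · simp [Nat.testBit_or, Nat.one_shiftLeft, Nat.testBit_two_pow]
  · intro j hj
    simp only [Nat.testBit_or, Bool.not_eq_true', Bool.or_eq_false_iff] at hj ⊢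
    exact hj.1

mutual
def pvCount (N K : Int) (kits : List Int) (used : Nat) (w d : Int)
    (memo : PySem.Dict Nat Int) : Int × PySem.Dict Nat Int :=
  if d = N then (1, memo)
  else
    match memo.get? used with
    | some v => (v, memo)
    | none =>
      let r := pvLoopB N K kits used w d 0 0 memo
      (r.1, r.2.insert used r.1)
  termination_by (pvUnused N.toNat used, 1, 0)
  decreasing_by
  · exact Prod.Lex.right _ (Prod.Lex.left _ _ Nat.zero_lt_one)

def pvLoopB (N K : Int) (kits : List Int) (used : Nat) (w d : Int) (i : Nat)
    (total : Int) (memo : PySem.Dict Nat Int) : Int × PySem.Dict Nat Int :=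
  if hi : i < N.toNat then
    if hb : used.testBit i then pvLoopB N K kits used w d (i + 1) total memo
    else
      if 500 ≤ w + kits.getD i 0 - K then
        let r := pvCount N K kits (used ||| 1 <<< i) (w + kits.getD i 0 - K) (d + 1) memo
        pvLoopB N K kits used w d (i + 1) (total + r.1) r.2
      else pvLoopB N K kits used w d (i + 1) total memo
  else (total, memo)
  termination_by (pvUnused N.toNat used, 0, N.toNat - i)
  decreasing_by
  · exact Prod.Lex.right _ (Prod.Lex.right _ (by omega))
  · exact Prod.Lex.left _ _ (pvUnused_lt _ _ _ hi (by simpa using hb))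
  · exact Prod.Lex.right _ (Prod.Lex.right _ (by omega))
  · exact Prod.Lex.right _ (Prod.Lex.right _ (by omega))
end

def solution_alt (N : Int) (K : Int) (kits : List Int) (current_weight : Int) (day : Int) : Int :=
  (pvCount N K kits 0 current_weight day PySem.Dict.empty).1

-- ===== PRECONDITION & SPEC =====
-- Pre_ excludes exactly the inputs on which Python A raises IndexError:
-- day ≠ N and N > len(kits) (the loop then reads kits[i] past the end; B reads
-- the same out-of-range kits[i] and raises there too).
def Pre_solution (N : Int) (K : Int) (kits : List Int) (current_weight : Int) (day : Int) : Prop :=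
  day = N ∨ N ≤ (kits.length : Int)
instance (N : Int) (K : Int) (kits : List Int) (current_weight : Int) (day : Int) : Decidable (Pre_solution N K kits current_weight day) := by unfold Pre_solution; infer_instance

def pvWitness_solution : Int × Int × List Int × Int × Int := (3, 4, [3, 7, 5], 500, 0)

def Spec_solution (N : Int) (K : Int) (kits : List Int) (current_weight : Int) (day : Int) (out : Int) : Prop := out = solution_alt N K kits current_weight day
instance (N : Int) (K : Int) (kits : List Int) (current_weight : Int) (day : Int) (out : Int) : Decidable (Spec_solution N K kits current_weight day out) := by unfold Spec_solution; infer_instance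

-- ===== CLAIM =====
def Claim_equal_solution : Prop := ∀ (N : Int) (K : Int) (kits : List Int) (current_weight : Int) (day : Int), Dom_solution N K kits current_weight day → Pre_solution N K kits current_weight day → Spec_solution N K kits current_weight day (solution N K kits current_weight day)

-- ===== LEMMAS AND PROOFS =====

-- the list of used indices below n, and the weight/day determined by it
def pvUsedList (n used : Nat) : List Nat := (List.range n).filter (fun j => used.testBit j)

def pvW (K : Int) (kits : List Int) (cw : Int) (n used : Nat) : Int :=
  cw + ((pvUsedList n used).map (fun i => kits.getD i 0 - K)).sum

def pvD (day : Int) (n used : Nat) : Int := day + (pvUsedList n used).length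

-- the Option-list state of port A determined by the bitmask
def pvMask (kits : List Int) (used : Nat) : List (Option Int) :=
  (List.range kits.length).map (fun i => if used.testBit i then none else some (kits.getD i 0))

-- memo invariant: every stored entry is the correct count for its bitmask
def pvGood (N K : Int) (kits : List Int) (cw day : Int) (memo : PySem.Dict Nat Int) : Prop :=
  ∀ u v, memo.get? u = some v →
    (∀ j, u.testBit j = true → j < N.toNat) ∧
    v = pvGo N K (pvMask kits u) (pvW K kits cw N.toNat u) (pvD day N.toNat u)

theorem pvMask_getD (kits : List Int) (used i : Nat) (hi : i < kits.length) :
    (pvMask kits used).getD i none = if used.testBit i then none else some (kits.getD i 0) := by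
  simp [pvMask, List.getD, hi]

theorem pvMask_set (kits : List Int) (used i : Nat) (hi : i < kits.length) :
    (pvMask kits used).set i none = pvMask kits (used ||| 1 <<< i) := by
  apply List.ext_getElem
  · simp [pvMask]
  intro j h1 h2
  rw [List.getElem_set]
  by_cases hij : i = j
  · subst hij
    simp [pvMask, Nat.testBit_or, Nat.one_shiftLeft, Nat.testBit_two_pow]
  · simp [pvMask, Nat.testBit_or, Nat.one_shiftLeft, Nat.testBit_two_pow, hij]

theorem pvFilter_perm (p p' : Nat → Bool) (i : Nat) (l : List Nat) (hnd : l.Nodup)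
    (hmem : i ∈ l) (hp : p i = false)
    (hq : ∀ j, p' j = (p j || decide (j = i))) :
    List.Perm (l.filter p') (i :: l.filter p) := by
  induction l with
  | nil => simp at hmem
  | cons a t ih =>
    rcases List.nodup_cons.mp hnd with ⟨hna, hndt⟩
    rcases List.mem_cons.mp hmem with rfl | hmem'
    · have hpa : p' i = true := by rw [hq]; simp
      have hft : t.filter p' = t.filter p := by
        apply List.filter_congr
        intro x hx
        rw [hq]
        have hxi : x ≠ i := fun hxa => hna (hxa ▸ hx)
        simp [hxi]
      simp [List.filter_cons, hpa, hp, hft]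
    · have hia : i ≠ a := fun hia => hna (hia ▸ hmem')
      have hpa : p' a = p a := by rw [hq]; simp [Ne.symm hia]
      by_cases ha : p a = true
      · simp only [List.filter_cons, hpa, ha, if_pos]
        exact (List.Perm.cons a (ih hndt hmem')).trans (List.Perm.swap i a _)
      · simp only [Bool.not_eq_true] at ha
        simp only [List.filter_cons, hpa, ha]
        simpa using ih hndt hmem'

theorem pvUsedList_or (n used i : Nat) (hi : i < n) (h : used.testBit i = false) :
    List.Perm (pvUsedList n (used ||| 1 <<< i)) (i :: pvUsedList n used) := by
  apply pvFilter_perm _ _ _ _ (List.nodup_range) (List.mem_range.mpr hi) h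
  intro j
  simp [Nat.testBit_or, Nat.one_shiftLeft, Nat.testBit_two_pow, eq_comm]

theorem pvW_or (K : Int) (kits : List Int) (cw : Int) (n used i : Nat)
    (hi : i < n) (h : used.testBit i = false) :
    pvW K kits cw n (used ||| 1 <<< i) = pvW K kits cw n used + kits.getD i 0 - K := by
  have hperm := (pvUsedList_or n used i hi h).map (fun j => kits.getD j 0 - K)
  have := hperm.sum_eq
  simp only [List.map_cons, List.sum_cons] at this
  simp only [pvW, this]
  ring

theorem pvD_or (day : Int) (n used i : Nat) (hi : i < n) (h : used.testBit i = false) :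
    pvD day n (used ||| 1 <<< i) = pvD day n used + 1 := by
  have := (pvUsedList_or n used i hi h).length_eq
  simp only [List.length_cons] at this
  simp only [pvD, this]
  push_cast
  ring

theorem pvBits_or (n used i : Nat) (hi : i < n)
    (hbits : ∀ j, used.testBit j = true → j < n) :
    ∀ j, (used ||| 1 <<< i).testBit j = true → j < n := by
  intro j hj
  rw [Nat.testBit_or, Nat.one_shiftLeft, Bool.or_eq_true] at hj
  rcases hj with hj | hj
  · exact hbits j hj
  · rw [Nat.testBit_two_pow] at hj
    simp at hj
    omega

theorem pvMask_zero (kits : List Int) : pvMask kits 0 = kits.map some := by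
  apply List.ext_getElem
  · simp [pvMask]
  intro j h1 h2
  have hj : j < kits.length := by simpa using h2
  simp [pvMask, Nat.zero_testBit, List.getD, List.getElem?_eq_getElem hj]

theorem pvUsedList_zero (n : Nat) : pvUsedList n 0 = [] := by
  simp [pvUsedList, Nat.zero_testBit]

theorem pvGood_empty (N K : Int) (kits : List Int) (cw day : Int) :
    pvGood N K kits cw day PySem.Dict.empty := by
  intro u v h
  simp [PySem.Dict.get?_empty] at h


-- unfolding lemmas for the two ports (one per branch of each loop body)
theorem pvGo_base {N K : Int} {kitsO : List (Option Int)} {cw day : Int}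
    (hd : day = N) : pvGo N K kitsO cw day = 1 := by
  rw [pvGo.eq_def, if_pos hd]

theorem pvGo_step {N K : Int} {kitsO : List (Option Int)} {cw day : Int}
    (hd : ¬ day = N) : pvGo N K kitsO cw day = pvLoopA N K kitsO cw day 0 0 := by
  rw [pvGo.eq_def, if_neg hd]

theorem pvLoopA_stop {N K : Int} {kitsO : List (Option Int)} {cw day : Int} {i : Nat} {acc : Int}
    (hi : ¬ i < N.toNat) : pvLoopA N K kitsO cw day i acc = acc := by
  rw [pvLoopA.eq_def, dif_neg hi]

theorem pvLoopA_skip {N K : Int} {kitsO : List (Option Int)} {cw day : Int} {i : Nat} {acc : Int}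
    (hi : i < N.toNat) (h : kitsO.getD i none = none) :
    pvLoopA N K kitsO cw day i acc = pvLoopA N K kitsO cw day (i + 1) acc := by
  rw [pvLoopA.eq_def, dif_pos hi]
  split
  · rfl
  · rename_i v heq
    rw [h] at heq
    simp at heq

theorem pvLoopA_pick {N K : Int} {kitsO : List (Option Int)} {cw day : Int} {i : Nat} {acc v : Int}
    (hi : i < N.toNat) (h : kitsO.getD i none = some v) :
    pvLoopA N K kitsO cw day i acc =
      if 500 ≤ cw + v - K then
        pvLoopA N K kitsO cw day (i + 1)
          (acc + pvGo N K (kitsO.set i none) (cw + v - K) (day + 1))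
      else pvLoopA N K kitsO cw day (i + 1) acc := by
  rw [pvLoopA.eq_def, dif_pos hi]
  split
  · rename_i heq
    rw [h] at heq
    simp at heq
  · rename_i v' heq
    rw [h] at heq
    obtain rfl := Option.some.inj heq
    rfl

theorem pvCount_base {N K : Int} {kits : List Int} {used : Nat} {w d : Int}
    {memo : PySem.Dict Nat Int} (hd : d = N) :
    pvCount N K kits used w d memo = (1, memo) := by
  rw [pvCount.eq_def, if_pos hd]

theorem pvCount_hit {N K : Int} {kits : List Int} {used : Nat} {w d : Int}
    {memo : PySem.Dict Nat Int} {v : Int} (hd : ¬ d = N) (hm : memo.get? used = some v) :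
    pvCount N K kits used w d memo = (v, memo) := by
  rw [pvCount.eq_def, if_neg hd, hm]

theorem pvCount_miss {N K : Int} {kits : List Int} {used : Nat} {w d : Int}
    {memo : PySem.Dict Nat Int} (hd : ¬ d = N) (hm : memo.get? used = none) :
    pvCount N K kits used w d memo =
      ((pvLoopB N K kits used w d 0 0 memo).1,
        (pvLoopB N K kits used w d 0 0 memo).2.insert used (pvLoopB N K kits used w d 0 0 memo).1) := by
  rw [pvCount.eq_def, if_neg hd, hm]

theorem pvLoopB_stop {N K : Int} {kits : List Int} {used : Nat} {w d : Int} {i : Nat}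
    {total : Int} {memo : PySem.Dict Nat Int} (hi : ¬ i < N.toNat) :
    pvLoopB N K kits used w d i total memo = (total, memo) := by
  rw [pvLoopB.eq_def, dif_neg hi]

theorem pvLoopB_skip {N K : Int} {kits : List Int} {used : Nat} {w d : Int} {i : Nat}
    {total : Int} {memo : PySem.Dict Nat Int} (hi : i < N.toNat) (hb : used.testBit i = true) :
    pvLoopB N K kits used w d i total memo = pvLoopB N K kits used w d (i + 1) total memo := by
  rw [pvLoopB.eq_def, dif_pos hi, dif_pos hb]

theorem pvLoopB_add {N K : Int} {kits : List Int} {used : Nat} {w d : Int} {i : Nat}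
    {total : Int} {memo : PySem.Dict Nat Int} (hi : i < N.toNat) (hb : used.testBit i = false)
    (hw : 500 ≤ w + kits.getD i 0 - K) :
    pvLoopB N K kits used w d i total memo =
      pvLoopB N K kits used w d (i + 1)
        (total + (pvCount N K kits (used ||| 1 <<< i) (w + kits.getD i 0 - K) (d + 1) memo).1)
        (pvCount N K kits (used ||| 1 <<< i) (w + kits.getD i 0 - K) (d + 1) memo).2 := by
  rw [pvLoopB.eq_def, dif_pos hi, dif_neg (by simp [hb]), if_pos hw]

theorem pvLoopB_no {N K : Int} {kits : List Int} {used : Nat} {w d : Int} {i : Nat}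
    {total : Int} {memo : PySem.Dict Nat Int} (hi : i < N.toNat) (hb : used.testBit i = false)
    (hw : ¬ 500 ≤ w + kits.getD i 0 - K) :
    pvLoopB N K kits used w d i total memo = pvLoopB N K kits used w d (i + 1) total memo := by
  rw [pvLoopB.eq_def, dif_pos hi, dif_neg (by simp [hb]), if_neg hw]

-- the loop bodies agree, given the outer induction hypothesis for smaller states
theorem pvLoop_eq (N K : Int) (kits : List Int) (cw day : Int)
    (hn : N.toNat ≤ kits.length) (used : Nat)
    (hbits : ∀ j, used.testBit j = true → j < N.toNat)
    (IH : ∀ used', pvUnused N.toNat used' < pvUnused N.toNat used →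
      (∀ j, used'.testBit j = true → j < N.toNat) →
      ∀ memo', pvGood N K kits cw day memo' →
      (pvCount N K kits used' (pvW K kits cw N.toNat used') (pvD day N.toNat used') memo').1
        = pvGo N K (pvMask kits used') (pvW K kits cw N.toNat used') (pvD day N.toNat used') ∧
      pvGood N K kits cw day
        (pvCount N K kits used' (pvW K kits cw N.toNat used') (pvD day N.toNat used') memo').2) :
    ∀ jf i acc memo, N.toNat - i = jf → pvGood N K kits cw day memo →
    (pvLoopB N K kits used (pvW K kits cw N.toNat used) (pvD day N.toNat used) i acc memo).1
      = pvLoopA N K (pvMask kits used) (pvW K kits cw N.toNat used) (pvD day N.toNat used) i acc ∧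
    pvGood N K kits cw day
      (pvLoopB N K kits used (pvW K kits cw N.toNat used) (pvD day N.toNat used) i acc memo).2 := by
  intro jf
  induction jf with
  | zero =>
    intro i acc memo hji hgood
    have hni : ¬ i < N.toNat := by omega
    rw [pvLoopB_stop hni, pvLoopA_stop hni]
    exact ⟨rfl, hgood⟩
  | succ jf ihj =>
    intro i acc memo hji hgood
    have hiN : i < N.toNat := by omega
    have hik : i < kits.length := lt_of_lt_of_le hiN hn
    by_cases hb : used.testBit i = true
    · rw [pvLoopB_skip hiN hb,
        pvLoopA_skip hiN (by rw [pvMask_getD kits used i hik, hb]; simp)]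
      exact ihj (i + 1) acc memo (by omega) hgood
    · have hbf : used.testBit i = false := by simpa using hb
      by_cases hw : 500 ≤ pvW K kits cw N.toNat used + kits.getD i 0 - K
      · have hW := pvW_or K kits cw N.toNat used i hiN hbf
        have hD := pvD_or day N.toNat used i hiN hbf
        have hrec := IH (used ||| 1 <<< i) (pvUnused_lt N.toNat i used hiN hbf)
          (pvBits_or N.toNat used i hiN hbits) memo hgood
        rw [pvLoopB_add hiN hbf hw,
          pvLoopA_pick (v := kits.getD i 0) hiN (by rw [pvMask_getD kits used i hik, hbf]; simp),
          if_pos hw, pvMask_set kits used i hik, ← hW, ← hD, hrec.1]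
        exact ihj (i + 1) _ _ (by omega) hrec.2
      · rw [pvLoopB_no hiN hbf hw,
          pvLoopA_pick (v := kits.getD i 0) hiN (by rw [pvMask_getD kits used i hik, hbf]; simp),
          if_neg hw]
        exact ihj (i + 1) acc memo (by omega) hgood

theorem pvMain (N K : Int) (kits : List Int) (cw day : Int)
    (hn : N.toNat ≤ kits.length) :
    ∀ k used memo, pvUnused N.toNat used = k →
      (∀ j, used.testBit j = true → j < N.toNat) →
      pvGood N K kits cw day memo →
      (pvCount N K kits used (pvW K kits cw N.toNat used) (pvD day N.toNat used) memo).1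
        = pvGo N K (pvMask kits used) (pvW K kits cw N.toNat used) (pvD day N.toNat used) ∧
      pvGood N K kits cw day
        (pvCount N K kits used (pvW K kits cw N.toNat used) (pvD day N.toNat used) memo).2 := by
  intro k
  induction k using Nat.strong_induction_on with
  | _ k IHk =>
    intro used memo hk hbits hgood
    have IH : ∀ used', pvUnused N.toNat used' < pvUnused N.toNat used →
        (∀ j, used'.testBit j = true → j < N.toNat) →
        ∀ memo', pvGood N K kits cw day memo' →
        (pvCount N K kits used' (pvW K kits cw N.toNat used') (pvD day N.toNat used') memo').1
          = pvGo N K (pvMask kits used') (pvW K kits cw N.toNat used') (pvD day N.toNat used') ∧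
        pvGood N K kits cw day
          (pvCount N K kits used' (pvW K kits cw N.toNat used') (pvD day N.toNat used') memo').2 := by
      intro used' hlt hbits' memo' hgood'
      exact IHk (pvUnused N.toNat used') (hk ▸ hlt) used' memo' rfl hbits' hgood'
    by_cases hd : pvD day N.toNat used = N
    · constructor
      · rw [pvCount_base hd, pvGo_base hd]
      · rw [pvCount_base hd]
        exact hgood
    · cases hmem : memo.get? used with
      | some v =>
        constructor
        · rw [pvCount_hit hd hmem]
          exact (hgood used v hmem).2
        · rw [pvCount_hit hd hmem]
          exact hgood
      | none =>
        have hloop := pvLoop_eq N K kits cw day hn used hbits IH (N.toNat - 0) 0 0 memo rfl hgood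
        constructor
        · rw [pvCount_miss hd hmem, pvGo_step hd]
          exact hloop.1
        · rw [pvCount_miss hd hmem]
          intro u v h
          have h' : ((pvLoopB N K kits used (pvW K kits cw N.toNat used) (pvD day N.toNat used) 0 0 memo).2.insert
              used (pvLoopB N K kits used (pvW K kits cw N.toNat used) (pvD day N.toNat used) 0 0 memo).1).get? u
              = some v := h
          rw [PySem.Dict.get?_insert] at h'
          by_cases hu : u = used
          · subst hu
            rw [if_pos rfl] at h'
            have hv := Option.some.inj h'
            refine ⟨hbits, ?_⟩
            rw [← hv, hloop.1, pvGo_step hd]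
          · rw [if_neg hu] at h'
            exact hloop.2 u v h'

-- ===== VERDICT =====
theorem solution_spec : Claim_equal_solution := by
  intro N K kits cw day _ hpre
  unfold Spec_solution solution solution_alt
  by_cases hday : day = N
  · rw [pvGo_base hday, pvCount_base hday]
  · have hlen : N ≤ (kits.length : Int) := by
      rcases hpre with h | h
      · exact absurd h.symm (fun h' => hday h'.symm)
      · exact h
    have hn : N.toNat ≤ kits.length := by omega
    have h0w : pvW K kits cw N.toNat 0 = cw := by simp [pvW, pvUsedList_zero]
    have h0d : pvD day N.toNat 0 = day := by simp [pvD, pvUsedList_zero]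
    have := pvMain N K kits cw day hn (pvUnused N.toNat 0) 0 PySem.Dict.empty rfl
      (by intro j hj; rw [Nat.zero_testBit] at hj; exact absurd hj (by simp))
      (pvGood_empty N K kits cw day)
    rw [h0w, h0d, pvMask_zero] at this
    exact this.1.symm
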